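-- pv_equiv track=rewrite | github.com/Arsen1302/Code-copy-detector | TestData/solutions/problem_1655_4.py | solution_1655_4
-- ===== SOURCE A (Python) =====
-- def solution_1655_4(nums: list[int]) -> bool:
-- 	sums = set()
--
-- 	for i in range(len(nums) - 1):
-- 		getSum = nums[i] + nums[i + 1]
-- 		if getSum in sums:
-- 			return True
-- 		sums.add(getSum)
-- 	return False
-- ===== SOURCE B (Python) =====
-- def solution_1655_4(nums: list[int]) -> bool:
--     sums = sorted(nums[i] + nums[i + 1] for i in range(len(nums) - 1))
--     return any(a == b for a, b in zip(sums, sums[1:]))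
-- ===== Notes on version B (the rewrite author's own statement) =====
-- stated objective: alternative
-- what changed: Replaces the incremental seen-set membership loop with early return by a sort-then-scan: sort all adjacent-pair sums and check whether any two neighbours in the sorted list are equal.
import Mathlib
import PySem

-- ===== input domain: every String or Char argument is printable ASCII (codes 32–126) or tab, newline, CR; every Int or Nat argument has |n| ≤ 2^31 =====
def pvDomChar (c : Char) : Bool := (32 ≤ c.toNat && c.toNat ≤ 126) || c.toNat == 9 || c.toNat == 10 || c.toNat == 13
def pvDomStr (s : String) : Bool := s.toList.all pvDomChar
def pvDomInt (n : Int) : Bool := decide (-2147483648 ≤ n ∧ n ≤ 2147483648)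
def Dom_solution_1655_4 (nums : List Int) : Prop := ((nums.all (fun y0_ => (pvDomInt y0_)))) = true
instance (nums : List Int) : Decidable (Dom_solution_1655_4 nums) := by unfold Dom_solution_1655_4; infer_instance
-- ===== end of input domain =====

-- B replaces A's incremental seen-set loop with early return by a sort-then-scan: sort all
-- adjacent-pair sums and check whether any two neighbours in the sorted list are equal;
-- objective: alternative (no hash/seen set at all, the duplicate test becomes a local comparison).

-- ===== PORT A =====
-- the 'for i in range(len(nums)-1)' loop with early return on membership
def solution_1655_4_loop (nums : List Int) : List Int → PySem.Set Int → Bool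
  | [], _ => false
  | i :: rest, sums =>
    let getSum := PySem.List.pyGetD nums i 0 + PySem.List.pyGetD nums (i + 1) 0
    if PySem.Set.contains sums getSum then true
    else solution_1655_4_loop nums rest (PySem.Set.add sums getSum)

def solution_1655_4 (nums : List Int) : Bool :=
  solution_1655_4_loop nums (PySem.List.pyRange 0 ((nums.length : Int) - 1) 1) PySem.Set.empty

-- ===== PORT B =====
def solution_1655_4_alt (nums : List Int) : Bool :=
  let sums := PySem.List.sorted
    ((PySem.List.pyRange 0 ((nums.length : Int) - 1) 1).map
      (fun i => PySem.List.pyGetD nums i 0 + PySem.List.pyGetD nums (i + 1) 0))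
    (fun x => x) false
  (sums.zip (PySem.List.slice sums (some 1) none)).any (fun p => p.1 == p.2)

-- ===== PRECONDITION & SPEC =====
def Spec_solution_1655_4 (nums : List Int) (out : Bool) : Prop := out = solution_1655_4_alt nums
instance (nums : List Int) (out : Bool) : Decidable (Spec_solution_1655_4 nums out) := by unfold Spec_solution_1655_4; infer_instance

-- ===== CLAIM (what is proved, stated in full; the proofs are below) =====
def Claim_equal_solution_1655_4 : Prop := ∀ (nums : List Int), Dom_solution_1655_4 nums → Spec_solution_1655_4 nums (solution_1655_4 nums)

-- ===== LEMMAS AND PROOFS =====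

-- the generic "seen set with early return" duplicate scan over an arbitrary value list
def scanDup : List Int → PySem.Set Int → Bool
  | [], _ => false
  | x :: rest, seen =>
    if PySem.Set.contains seen x then true else scanDup rest (PySem.Set.add seen x)

-- A's loop is scanDup over the mapped sums
theorem loop_eq_scanDup (nums : List Int) (l : List Int) (acc : PySem.Set Int) :
    solution_1655_4_loop nums l acc =
      scanDup (l.map (fun i => PySem.List.pyGetD nums i 0 + PySem.List.pyGetD nums (i + 1) 0)) acc := by
  induction l generalizing acc with
  | nil => rfl
  | cons i rest ih => simp [solution_1655_4_loop, scanDup, ih]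

theorem scanDup_spec (s : List Int) (acc : PySem.Set Int) (h : acc.Nodup) :
    scanDup s acc = !decide ((acc ++ s).Nodup) := by
  induction s generalizing acc with
  | nil => simp [scanDup, h]
  | cons x rest ih =>
    rw [scanDup]
    by_cases hx : x ∈ acc
    · have hnd : ¬ (acc ++ x :: rest).Nodup := fun hnd =>
        (List.disjoint_of_nodup_append hnd) hx (by simp)
      simp [hx, hnd]
    · have hacc : (acc ++ [x]).Nodup := by
        simp [List.nodup_append, h]
        exact fun a ha he => hx (he ▸ ha)
      simp only [PySem.Set.contains_eq_listContains, List.contains_eq_mem, hx, decide_false,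
        Bool.false_eq_true, if_false]
      rw [PySem.Set.add_of_not_mem hx, ih _ hacc]
      congr 2
      simp

-- on a ≤-sorted list, some adjacent pair is equal iff the list has a duplicate
theorem adjany_of_pairwise (l : List Int) (h : l.Pairwise (· ≤ ·)) :
    (l.zip l.tail).any (fun p => p.1 == p.2) = !decide l.Nodup := by
  induction l with
  | nil => simp
  | cons x t ih =>
    cases t with
    | nil => simp
    | cons y r =>
      rcases List.pairwise_cons.mp h with ⟨hxall, ht⟩
      by_cases hxy : x = y
      · subst hxy
        have : ¬ (x :: x :: r).Nodup := by simp
        simp [this]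
      · have hx_not : x ∉ y :: r := by
          rcases List.pairwise_cons.mp ht with ⟨hyall, _⟩
          intro hm
          rcases List.mem_cons.mp hm with hm | hm
          · exact hxy hm
          · have h1 : x ≤ y := hxall y (by simp)
            have h2 : y ≤ x := hyall x hm
            exact hxy (le_antisymm h1 h2)
        have : (x :: y :: r).Nodup ↔ (y :: r).Nodup := by
          simp [List.nodup_cons, hx_not]
        simp only [List.tail_cons, List.zip_cons_cons, List.any_cons, this]
        have := ih ht
        simp only [List.tail_cons] at this
        simp [hxy, this]

-- ===== VERDICT (by name: the statement is the Claim_ definition above) =====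
theorem solution_1655_4_spec : Claim_equal_solution_1655_4 := by
  intro nums _
  unfold Spec_solution_1655_4 solution_1655_4 solution_1655_4_alt
  rw [loop_eq_scanDup, scanDup_spec _ _ (by simp [PySem.Set.empty])]
  set s := (PySem.List.pyRange 0 ((nums.length : Int) - 1) 1).map
      (fun i => PySem.List.pyGetD nums i 0 + PySem.List.pyGetD nums (i + 1) 0) with hs
  simp only [PySem.List.slice_from_one]
  rw [adjany_of_pairwise _ (PySem.List.sorted_pairwise s (fun x => x))]
  have hperm := ((PySem.List.sorted_perm s (fun x => x) false).nodup_iff)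
  simp [PySem.Set.empty, hperm]
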